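-- pv_equiv track=rewrite | github.com/posl/comment_recommendation | script/split_gen/2_time/zh/201_C/5.py | get_possible_passwords
-- ===== SOURCE A (Python) =====
-- def get_possible_passwords(s):
--     possible_passwords = 1
--     for i in range(10):
--         if s[i] == 'o':
--             possible_passwords *= 1
--         elif s[i] == 'x':
--             possible_passwords *= 0
--         else:
--             possible_passwords *= 10
--     return possible_passwords
-- ===== SOURCE B (Python) =====
-- def get_possible_passwords(s):
--     chars = [s[i] for i in range(10)]
--     if 'x' in chars:
--         return 0
--     return 10 ** (10 - chars.count('o'))
-- ===== Notes on version B (the rewrite author's own statement) =====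
-- stated objective: simpler
-- what changed: Replaces the running-product loop with a closed form: materialise the ten characters once, return 0 if any is 'x', else 10 ** (10 - count of 'o').
import Mathlib
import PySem

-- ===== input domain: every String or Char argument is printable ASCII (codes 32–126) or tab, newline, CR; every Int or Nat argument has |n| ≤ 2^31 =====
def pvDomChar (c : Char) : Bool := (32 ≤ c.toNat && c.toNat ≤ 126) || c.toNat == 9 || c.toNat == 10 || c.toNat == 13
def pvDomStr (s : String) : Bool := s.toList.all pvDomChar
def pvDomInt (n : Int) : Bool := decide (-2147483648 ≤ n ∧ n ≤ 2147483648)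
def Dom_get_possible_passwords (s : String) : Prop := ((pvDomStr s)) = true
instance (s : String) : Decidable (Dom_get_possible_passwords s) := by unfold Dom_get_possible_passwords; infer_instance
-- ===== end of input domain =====

-- B replaces A's running-product loop with a closed form: 0 if any of the ten characters is 'x', else 10 ^ (10 - count of 'o').

-- ===== PORT A =====
-- loop 'for i in range(10)' multiplying the accumulator; s[i] is pyGet? (none = IndexError, excluded
-- by Pre_get_possible_passwords; the '.getD' default is never reached on Pre_ inputs)
def get_possible_passwords (s : String) : Int :=
  (PySem.List.pyRange 0 10 1).foldl (fun acc i =>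
    if (PySem.Str.pyGet? s i).getD ' ' = 'o' then acc * 1
    else if (PySem.Str.pyGet? s i).getD ' ' = 'x' then acc * 0
    else acc * 10) 1

-- ===== PORT B =====
-- chars = [s[i] for i in range(10)]; return 0 if 'x' in chars else 10 ** (10 - chars.count('o'))
def get_possible_passwords_alt (s : String) : Int :=
  let chars := (PySem.List.pyRange 0 10 1).map (fun i => (PySem.Str.pyGet? s i).getD ' ')
  if chars.contains 'x' then 0 else (10 : Int) ^ (10 - chars.count 'o')

-- ===== PRECONDITION & SPEC =====
-- Pre_: the Python A raises IndexError on strings shorter than 10 characters (B raises there too).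
def Pre_get_possible_passwords (s : String) : Prop := 10 ≤ s.toList.length
instance (s : String) : Decidable (Pre_get_possible_passwords s) := by unfold Pre_get_possible_passwords; infer_instance
def pvWitness_get_possible_passwords : String := "oxo?o?o?oo"

def Spec_get_possible_passwords (s : String) (out : Int) : Prop := out = get_possible_passwords_alt s
instance (s : String) (out : Int) : Decidable (Spec_get_possible_passwords s out) := by unfold Spec_get_possible_passwords; infer_instance

-- ===== CLAIM (what is proved, stated in full; the proofs are below) =====
def Claim_equal_get_possible_passwords : Prop := ∀ (s : String), Dom_get_possible_passwords s → Pre_get_possible_passwords s → Spec_get_possible_passwords s (get_possible_passwords s)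

-- ===== LEMMAS AND PROOFS =====

-- A's loop body folded over any character list equals B's closed form (0 on an 'x', else
-- acc times 10 to the number of non-'o' characters).
theorem pv_fold_closed (l : List Char) (acc : Int) :
    l.foldl (fun acc c => if c = 'o' then acc * 1 else if c = 'x' then acc * 0 else acc * 10) acc
      = if l.contains 'x' then 0 else acc * 10 ^ (l.length - l.count 'o') := by
  induction l generalizing acc with
  | nil => simp
  | cons c t ih =>
    simp only [List.foldl_cons, List.contains_cons, List.length_cons, List.count_cons]
    have hle : List.count 'o' t ≤ t.length := List.count_le_length
    by_cases hx : c = 'x'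
    · subst hx
      have h0 : (if ('x' : Char) = 'o' then acc * 1 else if ('x' : Char) = 'x' then acc * 0 else acc * 10) = 0 := by
        simp
      rw [h0, ih]
      simp
    · have hxc : ¬ (('x' : Char) = c) := fun h => hx h.symm
      by_cases ho : c = 'o'
      · subst ho
        rw [if_pos rfl, ih]
        have h1 : t.length + 1 - (List.count 'o' t + 1) = t.length - List.count 'o' t := by omega
        simp [h1]
      · rw [if_neg ho, if_neg hx, ih]
        have h1 : t.length + 1 - List.count 'o' t = (t.length - List.count 'o' t) + 1 := by omega
        by_cases hc : 'x' ∈ t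
        · simp [hc]
        · simp [hc, hxc, ho, h1, pow_succ]
          ring

-- ===== VERDICT (by name: the statement is the Claim_ definition above) =====
theorem get_possible_passwords_spec : Claim_equal_get_possible_passwords := by
  intro s _ _
  unfold Spec_get_possible_passwords
  have hB : get_possible_passwords_alt s =
      (if ((PySem.List.pyRange 0 10 1).map (fun i => (PySem.Str.pyGet? s i).getD ' ')).contains 'x'
        then 0
        else (10 : Int) ^ (10 - ((PySem.List.pyRange 0 10 1).map (fun i => (PySem.Str.pyGet? s i).getD ' ')).count 'o')) := rfl
  rw [hB]
  unfold get_possible_passwords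
  rw [show (fun (acc : Int) (i : Int) =>
    if (PySem.Str.pyGet? s i).getD ' ' = 'o' then acc * 1
    else if (PySem.Str.pyGet? s i).getD ' ' = 'x' then acc * 0
    else acc * 10)
    = (fun (acc : Int) (i : Int) =>
      (fun (acc : Int) (c : Char) => if c = 'o' then acc * 1 else if c = 'x' then acc * 0 else acc * 10)
        acc ((fun i => (PySem.Str.pyGet? s i).getD ' ') i)) from rfl]
  rw [← @List.foldl_map Int Char Int (fun i => (PySem.Str.pyGet? s i).getD ' ')
    (fun (acc : Int) (c : Char) => if c = 'o' then acc * 1 else if c = 'x' then acc * 0 else acc * 10)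
    (PySem.List.pyRange 0 10 1) 1]
  rw [pv_fold_closed]
  have hlen : ((PySem.List.pyRange 0 10 1).map (fun i => (PySem.Str.pyGet? s i).getD ' ')).length = 10 := by
    simp [PySem.List.length_pyRange_one]
  rw [hlen]
  by_cases hC : ((PySem.List.pyRange 0 10 1).map (fun i => (PySem.Str.pyGet? s i).getD ' ')).contains 'x'
  · rw [if_pos hC, if_pos hC]
  · rw [if_neg hC, if_neg hC, one_mul]
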